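-- pv_equiv track=rewrite | github.com/janmartinjansen/TVIT | autopython/vbpython2.py | vb2
-- ===== SOURCE A (Python) =====
-- def vb2(inp):
--     state = 1
--     end = [1]
--     for c in inp:
--         if state == 1:
--             if c == 'a':
--                 state = 2
--             else:
--                 return False
--         elif state == 2:
--             if c == 'a':
--                 state = 1
--             else:
--                 return False
--     return state in end
-- ===== SOURCE B (Python) =====
-- def vb2(inp):
--     return all(c == 'a' for c in inp) and len(inp) % 2 == 0
-- ===== Notes on version B (the rewrite author's own statement) =====
-- stated objective: simpler
-- what changed: Replaces the two-state DFA loop with a direct closed-form check: the input consists solely of the letter a and has even length.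
import Mathlib
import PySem

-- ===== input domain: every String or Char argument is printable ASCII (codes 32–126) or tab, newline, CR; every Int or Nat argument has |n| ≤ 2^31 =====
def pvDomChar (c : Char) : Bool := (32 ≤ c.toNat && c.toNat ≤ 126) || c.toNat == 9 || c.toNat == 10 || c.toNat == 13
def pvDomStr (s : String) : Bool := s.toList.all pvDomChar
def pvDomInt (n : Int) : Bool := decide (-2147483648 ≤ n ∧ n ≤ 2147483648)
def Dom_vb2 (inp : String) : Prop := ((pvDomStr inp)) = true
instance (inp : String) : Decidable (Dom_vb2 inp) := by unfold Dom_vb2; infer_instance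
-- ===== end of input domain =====

-- B replaces A's two-state DFA loop by a closed-form check (only letter a, even length); objective: simpler.

-- ===== PORT A =====
-- the DFA loop with early return False; at the end checks state ∈ end = [1]
def vb2Loop (state : Int) (cs : List Char) : Bool :=
  match cs with
  | [] => [(1 : Int)].contains state
  | c :: rest =>
    if state == 1 then
      if c == 'a' then vb2Loop 2 rest else false
    else if state == 2 then
      if c == 'a' then vb2Loop 1 rest else false
    else [(1 : Int)].contains state

def vb2 (inp : String) : Bool := vb2Loop 1 inp.toList

-- ===== PORT B =====
def vb2_alt (inp : String) : Bool :=
  inp.toList.all (fun c => c == 'a') && inp.toList.length % 2 == 0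

-- ===== PRECONDITION & SPEC =====
def Spec_vb2 (inp : String) (out : Bool) : Prop := out = vb2_alt inp
instance (inp : String) (out : Bool) : Decidable (Spec_vb2 inp out) := by unfold Spec_vb2; infer_instance

-- ===== CLAIM =====
def Claim_equal_vb2 : Prop := ∀ (inp : String), Dom_vb2 inp → Spec_vb2 inp (vb2 inp)

-- ===== LEMMAS AND PROOFS =====
lemma vb2Loop_char (cs : List Char) :
    (vb2Loop 1 cs = (cs.all (fun c => c == 'a') && cs.length % 2 == 0)) ∧
    (vb2Loop 2 cs = (cs.all (fun c => c == 'a') && cs.length % 2 == 1)) := by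
  induction cs with
  | nil => simp [vb2Loop]
  | cons c rest ih =>
    obtain ⟨ih1, ih2⟩ := ih
    constructor
    · simp only [vb2Loop, List.all_cons]
      by_cases h : c = 'a'
      · simp only [h, if_pos, ih2, beq_self_eq_true, Bool.true_and, List.length_cons]
        cases rest.all (fun c => c == 'a') with
        | false => simp
        | true =>
          simp only [Bool.true_and]
          rw [Bool.eq_iff_iff]
          simp only [beq_iff_eq]
          omega
      · simp [h]
    · simp only [vb2Loop, List.all_cons,
        show ((2:Int) == 1) = false from rfl, show ((2:Int) == 2) = true from rfl,
        Bool.false_eq_true, if_false, if_true]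
      by_cases h : c = 'a'
      · simp only [h, if_pos, ih1, beq_self_eq_true, Bool.true_and, List.length_cons]
        cases rest.all (fun c => c == 'a') with
        | false => simp
        | true =>
          simp only [Bool.true_and]
          rw [Bool.eq_iff_iff]
          simp only [beq_iff_eq]
          omega
      · simp [h]

-- ===== VERDICT =====
theorem vb2_spec : Claim_equal_vb2 := by
  intro inp _
  unfold Spec_vb2 vb2 vb2_alt
  exact (vb2Loop_char inp.toList).1
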